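-- pv_equiv track=rewrite | github.com/mrigakshichib/gfgpractice | Difficulty: Medium/Shortest Path in Weighted undirected graph/shortest-path-in-weighted-undirected-graph.py | check
-- ===== SOURCE A (Python) =====
-- def check(n, path, edges):
--     gp = [{} for i in range(n + 1)]
--     for u, v, w in edges:
--         if v in gp[u]:
--             gp[u][v] = min(gp[u][v], w)
--         else:
--             gp[u][v] = w
--
--         if u in gp[v]:
--             gp[v][u] = min(gp[v][u], w)
--         else:
--             gp[v][u] = w
--
--     s = 0
--     for i in range(2, len(path)):
--         if path[i] not in gp[path[i - 1]]:
--             return False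
--         s += gp[path[i - 1]][path[i]]
--
--     return s == path[0]
-- ===== SOURCE B (Python) =====
-- def check(n, path, edges):
--     total = 0
--     for a, b in zip(path[1:], path[2:]):
--         best = None
--         for u, v, w in edges:
--             if (u == a and v == b) or (u == b and v == a):
--                 best = w if best is None else min(best, w)
--         if best is None:
--             return False
--         total += best
--     return total == path[0]
-- ===== Notes on version B (the rewrite author's own statement) =====
-- stated objective: simpler
-- what changed: B drops A's adjacency-table build entirely: for each consecutive path pair it scans the edge list directly for the minimum weight of a matching undirected edge, summing as it goes.
-- outside the precondition, e.g. on check(1, [5, 1, 0], [(-1, 0, 5)]): A returns True, B returns False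
import Mathlib
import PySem

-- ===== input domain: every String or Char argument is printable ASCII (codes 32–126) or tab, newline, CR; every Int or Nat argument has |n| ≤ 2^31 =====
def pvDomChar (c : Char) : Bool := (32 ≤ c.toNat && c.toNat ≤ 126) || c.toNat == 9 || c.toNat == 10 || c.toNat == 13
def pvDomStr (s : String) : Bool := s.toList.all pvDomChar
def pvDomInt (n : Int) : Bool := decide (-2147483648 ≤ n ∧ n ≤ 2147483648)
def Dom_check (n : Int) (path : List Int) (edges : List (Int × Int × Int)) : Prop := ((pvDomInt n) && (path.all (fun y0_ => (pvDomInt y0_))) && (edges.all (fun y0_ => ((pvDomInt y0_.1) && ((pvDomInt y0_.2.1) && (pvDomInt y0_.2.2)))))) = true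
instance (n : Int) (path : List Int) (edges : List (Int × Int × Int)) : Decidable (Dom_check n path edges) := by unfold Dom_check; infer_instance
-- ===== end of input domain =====

-- B replaces A's adjacency-table build by a direct scan of the edge list for each consecutive
-- path pair (objective: simpler).

-- ===== PORT A =====

-- 'if v in gp[u]: gp[u][v] = min(gp[u][v], w) else: gp[u][v] = w'
def pvUpdMin (d : PySem.Dict Int Int) (k w : Int) : PySem.Dict Int Int :=
  match d.get? k with
  | some x => d.insert k (min x w)
  | none   => d.insert k w

-- read gp[i], replace it by f applied to it (Python raises IndexError where pyGet? is none;
-- those inputs are outside Pre_check)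
def pvSetRow (gp : List (PySem.Dict Int Int)) (i : Int)
    (f : PySem.Dict Int Int → PySem.Dict Int Int) : List (PySem.Dict Int Int) :=
  match PySem.List.pyGet? gp i with
  | some d => PySem.List.pySetD gp i (f d)
  | none   => gp

-- 'for u, v, w in edges: …' building gp
def pvBuild (edges : List (Int × Int × Int)) (gp : List (PySem.Dict Int Int)) :
    List (PySem.Dict Int Int) :=
  edges.foldl (fun gp e =>
    let gp := pvSetRow gp e.1 (fun d => pvUpdMin d e.2.1 e.2.2)
    pvSetRow gp e.2.1 (fun d => pvUpdMin d e.1 e.2.2)) gp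

-- 'for i in range(2, len(path)): …' with the early 'return False' carried as none
def pvLoopA (gp : List (PySem.Dict Int Int)) (path : List Int) (st : Option Int)
    (is : List Int) : Option Int :=
  is.foldl (fun st i =>
    match st with
    | none => none
    | some s =>
      match ((PySem.List.pyGet? gp ((PySem.List.pyGet? path (i - 1)).getD 0)).getD
          PySem.Dict.empty).get? ((PySem.List.pyGet? path i).getD 0) with
      | none => none
      | some w => some (s + w)) st

def check (n : Int) (path : List Int) (edges : List (Int × Int × Int)) : Bool :=
  let gp0 := (PySem.List.pyRange 0 (n + 1) 1).map (fun _ => (PySem.Dict.empty : PySem.Dict Int Int))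
  let gp := pvBuild edges gp0
  match pvLoopA gp path (some 0) (PySem.List.pyRange 2 (path.length : Int) 1) with
  | none => false
  | some s => decide (s = (PySem.List.pyGet? path 0).getD 0)

-- ===== PORT B =====

-- inner scan: minimum weight over edges matching the unordered pair {a, b}, none if no match
def pvPairMin (a b : Int) (edges : List (Int × Int × Int)) : Option Int :=
  edges.foldl (fun best e =>
    if (e.1 = a ∧ e.2.1 = b) ∨ (e.1 = b ∧ e.2.1 = a) then
      some (match best with | none => e.2.2 | some x => min x e.2.2)
    else best) none

-- 'for a, b in zip(path[1:], path[2:]): …' accumulating the total, none = early False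
def pvSumPairs (edges : List (Int × Int × Int)) (total : Int) : List (Int × Int) → Option Int
  | [] => some total
  | (a, b) :: rest =>
    match pvPairMin a b edges with
    | none => none
    | some w => pvSumPairs edges (total + w) rest

def check_alt (_n : Int) (path : List Int) (edges : List (Int × Int × Int)) : Bool :=
  let pairs := (PySem.List.slice path (some 1) none).zip (PySem.List.slice path (some 2) none)
  match pvSumPairs edges 0 pairs with
  | none => false
  | some t => decide (t = (PySem.List.pyGet? path 0).getD 0)

-- ===== PRECONDITION & SPEC =====

-- Pre_ excludes exactly (i) inputs where A raises — empty path, or a node index outside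
-- [-(n+1), n] — and (ii) inputs where a node id offset by exactly n+1 from a visited path node
-- makes Python's negative-index wraparound alias two distinct node ids, an artefact of A's list
-- indexing that B does not reproduce.
def Pre_check (n : Int) (path : List Int) (edges : List (Int × Int × Int)) : Prop :=
  path ≠ [] ∧
  (∀ e ∈ edges, (-(n + 1) ≤ e.1 ∧ e.1 ≤ n) ∧ (-(n + 1) ≤ e.2.1 ∧ e.2.1 ≤ n)) ∧
  (∀ x ∈ (path.drop 1).dropLast, -(n + 1) ≤ x ∧ x ≤ n) ∧
  (∀ x ∈ (path.drop 1).dropLast, ∀ e ∈ edges,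
    e.1 ≠ x + (n + 1) ∧ e.1 ≠ x - (n + 1) ∧ e.2.1 ≠ x + (n + 1) ∧ e.2.1 ≠ x - (n + 1))
instance (n : Int) (path : List Int) (edges : List (Int × Int × Int)) : Decidable (Pre_check n path edges) := by unfold Pre_check; infer_instance

def pvWitness_check : Int × List Int × (List (Int × Int × Int)) :=
  (2, [3, 0, 1, 2], [(0, 1, 1), (1, 2, 2)])

def Spec_check (n : Int) (path : List Int) (edges : List (Int × Int × Int)) (out : Bool) : Prop := out = check_alt n path edges
instance (n : Int) (path : List Int) (edges : List (Int × Int × Int)) (out : Bool) : Decidable (Spec_check n path edges out) := by unfold Spec_check; infer_instance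

-- ===== CLAIM (what is proved, stated in full; the proofs are below) =====
def Claim_equal_check : Prop := ∀ (n : Int) (path : List Int) (edges : List (Int × Int × Int)), Dom_check n path edges → Pre_check n path edges → Spec_check n path edges (check n path edges)

-- ===== LEMMAS AND PROOFS =====

-- row gp a = gp[a] (empty off range), idx gp a b = gp[a].get(b)
def pvRow (gp : List (PySem.Dict Int Int)) (a : Int) : PySem.Dict Int Int :=
  (PySem.List.pyGet? gp a).getD PySem.Dict.empty

def pvIdx (gp : List (PySem.Dict Int Int)) (a b : Int) : Option Int :=
  (pvRow gp a).get? b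

-- one min-accumulation step, the common shape of A's dict update and B's scan
def pvStep (o : Option Int) (w : Int) : Option Int :=
  some (match o with | none => w | some x => min x w)

-- B's scan with a general initial accumulator (pvPairMin = pvScan … none by rfl)
def pvScan (a b : Int) (edges : List (Int × Int × Int)) (o : Option Int) : Option Int :=
  edges.foldl (fun best e =>
    if (e.1 = a ∧ e.2.1 = b) ∨ (e.1 = b ∧ e.2.1 = a) then
      some (match best with | none => e.2.2 | some x => min x e.2.2)
    else best) o

theorem pvPairMin_eq_scan (a b : Int) (edges : List (Int × Int × Int)) :
    pvPairMin a b edges = pvScan a b edges none := rfl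

theorem pvScan_cons (a b : Int) (e : Int × Int × Int) (es : List (Int × Int × Int)) (o : Option Int) :
    pvScan a b (e :: es) o = pvScan a b es
      (if (e.1 = a ∧ e.2.1 = b) ∨ (e.1 = b ∧ e.2.1 = a) then pvStep o e.2.2 else o) := rfl

theorem pvStep_idem (o : Option Int) (w : Int) : pvStep (pvStep o w) w = pvStep o w := by
  cases o <;> simp [pvStep]

theorem pvUpdMin_get? (d : PySem.Dict Int Int) (k w b : Int) :
    (pvUpdMin d k w).get? b = if b = k then pvStep (d.get? k) w else d.get? b := by
  unfold pvUpdMin pvStep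
  cases h : d.get? k <;> simp [PySem.Dict.get?_insert]

theorem pvSetRow_length (gp : List (PySem.Dict Int Int)) (i : Int) (f) :
    (pvSetRow gp i f).length = gp.length := by
  unfold pvSetRow
  cases h : PySem.List.pyGet? gp i
  · rfl
  · simp [PySem.List.length_pySetD]

-- the effective row index of Python's list indexing: negative indices count from the end
def pvWrap (len : Nat) (i : Int) : Int := if i < 0 then i + len else i

theorem pvWrap_bounds (len : Nat) (i : Int) (h1 : -(len : Int) ≤ i) (h2 : i < (len : Int)) :
    0 ≤ pvWrap len i ∧ pvWrap len i < (len : Int) := by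
  unfold pvWrap
  split_ifs <;> omega

theorem pvIdx?_eq (len : Nat) (i : Int) (h1 : -(len : Int) ≤ i) (h2 : i < (len : Int)) :
    PySem.List.pyIdx? len i = some (pvWrap len i).toNat := by
  unfold PySem.List.pyIdx? pvWrap
  by_cases h : i < 0
  · rw [if_neg (by omega : ¬ 0 ≤ i), if_pos (by omega : -(len : Int) ≤ i), if_pos h]
    congr 1
    omega
  · rw [if_pos (by omega : 0 ≤ i), if_pos h2, if_neg h]

theorem pvGet?_wrap (gp : List (PySem.Dict Int Int)) (i : Int)
    (h1 : -(gp.length : Int) ≤ i) (h2 : i < (gp.length : Int)) :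
    PySem.List.pyGet? gp i = gp[(pvWrap gp.length i).toNat]? := by
  unfold PySem.List.pyGet?
  rw [pvIdx?_eq _ _ h1 h2]
  rfl

theorem pvSetD_wrap (gp : List (PySem.Dict Int Int)) (i : Int) (v : PySem.Dict Int Int)
    (h1 : -(gp.length : Int) ≤ i) (h2 : i < (gp.length : Int)) :
    PySem.List.pySetD gp i v = gp.set (pvWrap gp.length i).toNat v := by
  unfold PySem.List.pySetD PySem.List.pySet?
  rw [pvIdx?_eq _ _ h1 h2]
  rfl

theorem pvSetRow_row (gp : List (PySem.Dict Int Int)) (i : Int) (f)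
    (hi1 : -(gp.length : Int) ≤ i) (hi2 : i < (gp.length : Int))
    (a : Int) (ha1 : -(gp.length : Int) ≤ a) (ha2 : a < (gp.length : Int)) :
    pvRow (pvSetRow gp i f) a =
      if pvWrap gp.length a = pvWrap gp.length i then f (pvRow gp i) else pvRow gp a := by
  obtain ⟨hwi1, hwi2⟩ := pvWrap_bounds gp.length i hi1 hi2
  obtain ⟨hwa1, hwa2⟩ := pvWrap_bounds gp.length a ha1 ha2
  have hiN : (pvWrap gp.length i).toNat < gp.length := by omega
  have hget : PySem.List.pyGet? gp i = some gp[(pvWrap gp.length i).toNat] := by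
    rw [pvGet?_wrap gp i hi1 hi2, List.getElem?_eq_getElem hiN]
  have hrowa : pvRow gp a = gp[(pvWrap gp.length a).toNat]?.getD PySem.Dict.empty := by
    unfold pvRow
    rw [pvGet?_wrap gp a ha1 ha2]
  have hrowi : pvRow gp i = gp[(pvWrap gp.length i).toNat] := by
    simp [pvRow, hget]
  have hsetlist : pvSetRow gp i f =
      gp.set (pvWrap gp.length i).toNat (f gp[(pvWrap gp.length i).toNat]) := by
    unfold pvSetRow
    rw [hget]
    dsimp only
    rw [pvSetD_wrap gp i _ hi1 hi2]
  have hread : pvRow (pvSetRow gp i f) a =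
      (gp.set (pvWrap gp.length i).toNat
        (f gp[(pvWrap gp.length i).toNat]))[(pvWrap gp.length a).toNat]?.getD
        PySem.Dict.empty := by
    unfold pvRow
    rw [hsetlist, pvGet?_wrap _ a (by simpa using ha1) (by simpa using ha2)]
    simp
  rw [hread, hrowa, hrowi]
  by_cases hw : pvWrap gp.length a = pvWrap gp.length i
  · have heq : (pvWrap gp.length i).toNat = (pvWrap gp.length a).toNat := by omega
    rw [if_pos hw]
    simp [heq, show (pvWrap gp.length a).toNat < gp.length by omega]
  · have hne : (pvWrap gp.length i).toNat ≠ (pvWrap gp.length a).toNat := by omega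
    rw [if_neg hw]
    simp [hne]

theorem pvBuild_idx (edges : List (Int × Int × Int)) (gp : List (PySem.Dict Int Int))
    (hE : ∀ e ∈ edges, (-(gp.length : Int) ≤ e.1 ∧ e.1 < (gp.length : Int)) ∧
      (-(gp.length : Int) ≤ e.2.1 ∧ e.2.1 < (gp.length : Int)))
    (a b : Int) (ha1 : -(gp.length : Int) ≤ a) (ha2 : a < (gp.length : Int))
    (hA : ∀ e ∈ edges, (pvWrap gp.length e.1 = pvWrap gp.length a → e.1 = a) ∧
      (pvWrap gp.length e.2.1 = pvWrap gp.length a → e.2.1 = a)) :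
    pvIdx (pvBuild edges gp) a b = pvScan a b edges (pvIdx gp a b) := by
  induction edges generalizing gp with
  | nil => rfl
  | cons e es ih =>
    obtain ⟨u, v, w⟩ := e
    obtain ⟨⟨hu1', hu2'⟩, ⟨hv1', hv2'⟩⟩ := hE (u, v, w) (by simp)
    obtain ⟨hAu', hAv'⟩ := hA (u, v, w) (by simp)
    have hu1 : -(gp.length : Int) ≤ u := hu1'
    have hu2 : u < (gp.length : Int) := hu2'
    have hv1 : -(gp.length : Int) ≤ v := hv1'
    have hv2 : v < (gp.length : Int) := hv2'
    have hAu : pvWrap gp.length u = pvWrap gp.length a → u = a := hAu'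
    have hAv : pvWrap gp.length v = pvWrap gp.length a → v = a := hAv'
    set gp1 := pvSetRow gp u (fun d => pvUpdMin d v w) with hgp1
    set gp2 := pvSetRow gp1 v (fun d => pvUpdMin d u w) with hgp2
    have hlen1 : gp1.length = gp.length := pvSetRow_length ..
    have hlen2 : gp2.length = gp.length := by rw [hgp2, pvSetRow_length, hlen1]
    have hstep : pvBuild ((u, v, w) :: es) gp = pvBuild es gp2 := rfl
    have hcond : ∀ x : Int, (pvWrap gp.length x = pvWrap gp.length a → x = a) →
        ((pvWrap gp.length a = pvWrap gp.length x) ↔ a = x) := by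
      intro x hx
      constructor
      · intro h
        exact (hx h.symm).symm
      · intro h
        rw [h]
    have hrow1a : pvRow gp1 a = if a = u then pvUpdMin (pvRow gp u) v w else pvRow gp a := by
      rw [hgp1, pvSetRow_row gp u _ hu1 hu2 a ha1 ha2, if_congr (hcond u hAu) rfl rfl]
    have hidx2 : pvIdx gp2 a b =
        if (u = a ∧ v = b) ∨ (u = b ∧ v = a) then pvStep (pvIdx gp a b) w
        else pvIdx gp a b := by
      unfold pvIdx
      rw [hgp2, pvSetRow_row gp1 v _ (by rw [hlen1]; exact hv1) (by rw [hlen1]; exact hv2)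
        a (by rw [hlen1]; exact ha1) (by rw [hlen1]; exact ha2), hlen1,
        if_congr (hcond v hAv) rfl rfl]
      by_cases hav : a = v
      · rw [if_pos hav]
        subst hav
        rw [hrow1a]
        split_ifs <;> (try simp only [pvUpdMin_get?]) <;> (try split_ifs) <;>
          first
            | rfl
            | omega
            | (subst_vars; first | rfl | rw [pvStep_idem])
      · rw [if_neg hav, hrow1a]
        split_ifs <;> (try simp only [pvUpdMin_get?]) <;> (try split_ifs) <;>
          first
            | rfl
            | omega
            | (subst_vars; rfl)
    rw [hstep, ih gp2
      (by intro e' he'; rw [hlen2]; exact hE e' (by simp [he']))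
      (by rw [hlen2]; exact ha1) (by rw [hlen2]; exact ha2)
      (by intro e' he'; rw [hlen2]; exact hA e' (by simp [he'])),
      hidx2, pvScan_cons]

-- the initial table of empty rows answers none everywhere
theorem pvIdx_init (n : Int) (a b : Int) :
    pvIdx ((PySem.List.pyRange 0 (n + 1) 1).map
      (fun _ => (PySem.Dict.empty : PySem.Dict Int Int))) a b = none := by
  unfold pvIdx pvRow
  cases h : PySem.List.pyGet? ((PySem.List.pyRange 0 (n + 1) 1).map
      (fun _ => (PySem.Dict.empty : PySem.Dict Int Int))) a with
  | none => simp
  | some d =>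
    have hd := PySem.List.mem_of_pyGet?_eq_some _ h
    simp only [List.mem_map] at hd
    obtain ⟨x, -, hx⟩ := hd
    simp [← hx]

-- A's loop from the none state stays none
theorem pvLoopA_none (gp : List (PySem.Dict Int Int)) (path : List Int) (is : List Int) :
    pvLoopA gp path none is = none := by
  induction is with
  | nil => rfl
  | cons i is ih => simpa [pvLoopA, List.foldl_cons] using ih

theorem pvLoopA_cons (gp : List (PySem.Dict Int Int)) (path : List Int) (s : Int)
    (i : Int) (is : List Int) :
    pvLoopA gp path (some s) (i :: is) = pvLoopA gp path
      (match ((PySem.List.pyGet? gp ((PySem.List.pyGet? path (i - 1)).getD 0)).getD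
          PySem.Dict.empty).get? ((PySem.List.pyGet? path i).getD 0) with
       | none => none
       | some w => some (s + w)) is := rfl

-- main loop correspondence: A's index loop from k equals B's recursion on the zipped tails
theorem pvLoop_eq (n : Int) (path : List Int) (edges : List (Int × Int × Int))
    (gp0 : List (PySem.Dict Int Int))
    (hlen : gp0.length = (n + 1).toNat)
    (hinit : ∀ a b : Int, pvIdx gp0 a b = none)
    (hI : ∀ x ∈ (path.drop 1).dropLast, -(n + 1) ≤ x ∧ x ≤ n)
    (hE : ∀ e ∈ edges, (-(n + 1) ≤ e.1 ∧ e.1 ≤ n) ∧ (-(n + 1) ≤ e.2.1 ∧ e.2.1 ≤ n))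
    (hAl : ∀ x ∈ (path.drop 1).dropLast, ∀ e ∈ edges,
      e.1 ≠ x + (n + 1) ∧ e.1 ≠ x - (n + 1) ∧ e.2.1 ≠ x + (n + 1) ∧ e.2.1 ≠ x - (n + 1)) :
    ∀ (m k : Nat) (s : Int), path.length - k = m → 2 ≤ k →
      pvLoopA (pvBuild edges gp0) path (some s)
        (PySem.List.pyRange (k : Int) (path.length : Int) 1) =
      pvSumPairs edges s ((path.drop (k - 1)).zip (path.drop k)) := by
  intro m
  induction m with
  | zero =>
    intro k s hm hk
    have hkL : path.length ≤ k := by omega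
    rw [PySem.List.pyRange_one_eq_nil (by exact_mod_cast hkL),
      List.drop_eq_nil_of_le hkL, List.zip_nil_right]
    rfl
  | succ m ih =>
    intro k s hm hk
    have hkL : k < path.length := by omega
    have hk1 : k - 1 < path.length := by omega
    have hdrop1 : path.drop (k - 1) = path[k - 1] :: path.drop k := by
      have e : k - 1 + 1 = k := by omega
      rw [List.drop_eq_getElem_cons hk1, e]
    have hdropk : path.drop k = path[k] :: path.drop (k + 1) :=
      List.drop_eq_getElem_cons hkL
    have hmem : path[k - 1] ∈ (path.drop 1).dropLast := by
      have h1 : k - 2 < (path.drop 1).dropLast.length := by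
        simp [List.length_dropLast]
        omega
      have h2 : (path.drop 1).dropLast[k - 2] = path[k - 1] := by
        rw [List.getElem_dropLast, List.getElem_drop]
        congr 1
        omega
      rw [← h2]
      exact List.getElem_mem h1
    obtain ⟨ha1', ha2'⟩ := hI _ hmem
    have hn0 : 0 ≤ n := by omega
    have hlenI : (gp0.length : Int) = n + 1 := by rw [hlen]; omega
    have ha1 : -(gp0.length : Int) ≤ path[k - 1] := by omega
    have ha2 : path[k - 1] < (gp0.length : Int) := by omega
    have hE' : ∀ e ∈ edges, (-(gp0.length : Int) ≤ e.1 ∧ e.1 < (gp0.length : Int)) ∧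
        (-(gp0.length : Int) ≤ e.2.1 ∧ e.2.1 < (gp0.length : Int)) := by
      intro e he
      obtain ⟨⟨h1, h2⟩, h3, h4⟩ := hE e he
      constructor <;> constructor <;> omega
    have hA' : ∀ e ∈ edges,
        (pvWrap gp0.length e.1 = pvWrap gp0.length path[k - 1] → e.1 = path[k - 1]) ∧
        (pvWrap gp0.length e.2.1 = pvWrap gp0.length path[k - 1] → e.2.1 = path[k - 1]) := by
      intro e he
      obtain ⟨⟨h1, h2⟩, h3, h4⟩ := hE e he
      obtain ⟨h5, h6, h7, h8⟩ := hAl _ hmem e he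
      unfold pvWrap
      constructor <;> (split_ifs <;> omega)
    have hget1d : (PySem.List.pyGet? path ((k : Int) - 1)).getD 0 = path[k - 1] := by
      rw [PySem.List.pyGet?_eq_some_getElem path (by omega) (by omega)]
      have e1 : ((k : Int) - 1).toNat = k - 1 := by omega
      simp only [e1, Option.getD_some]
    have hget2d : (PySem.List.pyGet? path (k : Int)).getD 0 = path[k] := by
      rw [PySem.List.pyGet?_eq_some_getElem path (by omega) (by exact_mod_cast hkL)]
      simp only [Int.toNat_natCast, Option.getD_some]
    have hlook : ((PySem.List.pyGet? (pvBuild edges gp0) path[k - 1]).getD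
        PySem.Dict.empty).get? path[k] = pvPairMin path[k - 1] path[k] edges := by
      show pvIdx (pvBuild edges gp0) path[k - 1] path[k] = _
      rw [pvBuild_idx edges gp0 hE' _ _ ha1 ha2 hA', hinit, pvPairMin_eq_scan]
    rw [PySem.List.pyRange_one_cons (show (k : Int) < (path.length : Int) by exact_mod_cast hkL),
      pvLoopA_cons, hget1d, hget2d, hlook, hdrop1, hdropk]
    rw [List.zip_cons_cons, ← hdropk]
    cases hpm : pvPairMin path[k - 1] path[k] edges with
    | none =>
      rw [pvLoopA_none]
      simp [pvSumPairs, hpm]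
    | some w =>
      have hrhs : pvSumPairs edges s ((path[k - 1], path[k]) :: (path.drop k).zip (path.drop (k + 1))) =
          pvSumPairs edges (s + w) ((path.drop k).zip (path.drop (k + 1))) := by
        simp [pvSumPairs, hpm]
      rw [hrhs]
      show pvLoopA (pvBuild edges gp0) path (some (s + w))
          (PySem.List.pyRange ((k : Int) + 1) (path.length : Int) 1) = _
      have hcast : ((k : Int) + 1) = ((k + 1 : Nat) : Int) := by push_cast; ring
      rw [hcast, ih (k + 1) (s + w) (by omega) (by omega), Nat.add_sub_cancel]

-- ===== VERDICT (by name: the statement is the Claim_ definition above) =====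
theorem check_spec : Claim_equal_check := by
  intro n path edges _hdom hpre
  obtain ⟨hne, hE, hI, hAl⟩ := hpre
  unfold Spec_check check check_alt
  have hlen : ((PySem.List.pyRange 0 (n + 1) 1).map
      (fun _ => (PySem.Dict.empty : PySem.Dict Int Int))).length = (n + 1).toNat := by
    rw [List.length_map, PySem.List.length_pyRange_one]
    omega
  have hinit : ∀ a b : Int,
      pvIdx ((PySem.List.pyRange 0 (n + 1) 1).map
        (fun _ => (PySem.Dict.empty : PySem.Dict Int Int))) a b = none :=
    fun a b => pvIdx_init n a b
  have hloop := pvLoop_eq n path edges _ hlen hinit hI hE hAl (path.length - 2) 2 0 rfl (le_refl 2)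
  have h2 : ((2 : Nat) : Int) = (2 : Int) := rfl
  rw [h2] at hloop
  dsimp only
  rw [hloop]
  rw [PySem.List.slice_from_one, ← List.drop_one,
    PySem.List.slice_from path (show (0:Int) ≤ 2 by norm_num)]
  rfl
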